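-- pv_equiv track=rewrite | github.com/JakubKazimierski/PythonPortfolio | Medium/BitmapHoles/BitmapHoles.py | BitmapHoles
-- ===== SOURCE A (Python) =====
-- def pop_connected(row_id, char_id, arr):
--     for coord in ((row_id, char_id - 1), (row_id, char_id + 1), (row_id - 1, char_id), (row_id + 1, char_id)):
--         try:
--             arr.remove(coord)
--             # recurency call for removing connected zeros
--             pop_connected(coord[0], coord[1], arr)
--
--         # if index error occurs
--         except:
--             continue
--
-- def BitmapHoles(strArr):
--     '''
--     Have the function BitmapHoles(strArr)
--     take the array of strings stored in strArr,
--     which will be a 2D matrix of 0 and 1's, and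
--     determine how many holes, or contiguous regions of 0's,
--     exist in the matrix. A contiguous region is one where there
--     is a connected group of 0's going in one or more of four directions:
--     up, down, left, or right.
--
--     For example: if strArr is ["10111", "10101", "11101", "11111"],
--     then this looks like the following matrix:
--
--     1 0 1 1 1
--     1 0 1 0 1
--     1 1 1 0 1
--     1 1 1 1 1
--
--     For the input above, your program should return 2 because there are
--     two separate contiguous regions of 0's, which create "holes" in the matrix.
--     You can assume the input will not be empty.
--     '''
--
--     zero_coords = []
--     for row_id, row in enumerate(strArr):
--         for char_id, char in enumerate(row):
--             if char  == '0':
--                 zero_coords.append((row_id, char_id))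
--
--
--     count = 0
--     while zero_coords:
--         count += 1
--         row_id, char_id = zero_coords.pop(0)
--         pop_connected(row_id, char_id, zero_coords)
--
--     return count
-- ===== SOURCE B (Python) =====
-- def BitmapHoles(strArr):
--     order = [(i, j) for i, row in enumerate(strArr)
--                     for j, ch in enumerate(row) if ch == '0']
--     zeros = set(order)
--     count = 0
--     for cell in order:
--         if cell in zeros:
--             count += 1
--             zeros.discard(cell)
--             stack = [cell]
--             while stack:
--                 r, c = stack.pop()
--                 for nb in ((r, c - 1), (r, c + 1), (r - 1, c), (r + 1, c)):
--                     if nb in zeros: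
--                         zeros.discard(nb)
--                         stack.append(nb)
--     return count
-- ===== Notes on version B (the rewrite author's own statement) =====
-- stated objective: alternative
-- what changed: Replaces A's recursive pop_connected, which repeatedly calls list.remove on the shrinking list of zero coordinates, by an iterative stack-based flood fill over a hash set of zero coordinates, seeded by scanning the zero list in order and skipping already-consumed cells; tradeoff: set-based O(1) membership/removal instead of list scans, at similar measured cost on the generated inputs.
import Mathlib
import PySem

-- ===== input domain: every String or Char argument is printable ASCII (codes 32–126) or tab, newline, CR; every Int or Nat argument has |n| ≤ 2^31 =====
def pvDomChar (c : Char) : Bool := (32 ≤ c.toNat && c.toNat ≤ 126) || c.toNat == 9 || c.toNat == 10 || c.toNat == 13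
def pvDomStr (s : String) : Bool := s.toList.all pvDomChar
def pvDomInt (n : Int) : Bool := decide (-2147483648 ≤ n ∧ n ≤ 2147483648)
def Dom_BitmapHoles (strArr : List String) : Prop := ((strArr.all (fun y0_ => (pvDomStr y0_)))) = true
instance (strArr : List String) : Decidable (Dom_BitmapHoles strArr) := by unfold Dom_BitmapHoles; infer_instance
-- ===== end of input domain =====

-- B replaces A's recursive pop_connected flood fill over a list of zero coordinates
-- (list.remove scans) by an iterative stack flood fill over a set of zero coordinates.

-- The four Python neighbour coordinates ((r,c-1),(r,c+1),(r-1,c),(r+1,c)), used by both ports.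
def pvNbrs (p : Int × Int) : List (Int × Int) :=
  [(p.1, p.2 - 1), (p.1, p.2 + 1), (p.1 - 1, p.2), (p.1 + 1, p.2)]

-- ===== PORT A =====
-- pop_connected: for each of the 4 neighbour coords, try arr.remove(coord) and recurse.
-- Python's recursion has no fuel; each recursive call follows a successful removal, so
-- recursion depth ≤ |arr| and fuel = |arr| at the call site makes this exact.
def pvPop : Nat → Int → Int → List (Int × Int) → List (Int × Int)
  | 0, _, _, arr => arr
  | Nat.succ f, r, c, arr =>
      (pvNbrs (r, c)).foldl (fun a co =>
        match PySem.List.remove? a co with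
        | none => a                                -- except: continue
        | some a' => pvPop f co.1 co.2 a') arr

theorem pvPop_length_le : ∀ (f : Nat) (r c : Int) (arr : List (Int × Int)),
    (pvPop f r c arr).length ≤ arr.length := by
  intro f
  induction f with
  | zero => intro r c arr; simp [pvPop]
  | succ f ih =>
    intro r c arr
    show (List.foldl _ arr (pvNbrs (r, c))).length ≤ arr.length
    generalize pvNbrs (r, c) = cos
    induction cos generalizing arr with
    | nil => simp
    | cons co cs ihc =>
      simp only [List.foldl_cons]
      refine le_trans (ihc _) ?_
      cases h : PySem.List.remove? arr co with
      | none => simp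
      | some a' =>
        have hco : co ∈ arr := by
          by_contra hn
          rw [(PySem.List.remove?_eq_none_iff arr co).2 hn] at h; simp at h
        have ha' : a' = arr.erase co := by
          have h2 := PySem.List.remove?_eq_some_erase arr co hco
          rw [h2] at h; exact (Option.some_inj.1 h).symm
        subst ha'
        simp only
        refine le_trans (ih _ _ _) ?_
        exact List.erase_sublist.length_le

-- while zero_coords: count += 1; pop(0); pop_connected(...)
def pvHolesLoop : List (Int × Int) → Int → Int
  | [], count => count
  | p :: rest, count => pvHolesLoop (pvPop rest.length p.1 p.2 rest) (count + 1)
  termination_by l _ => l.length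
  decreasing_by
    exact Nat.lt_succ_of_le (pvPop_length_le _ _ _ _)

def BitmapHoles (strArr : List String) : Int :=
  let zeroCoords : List (Int × Int) :=
    (PySem.List.enumerate strArr).foldl (fun acc p =>
      (PySem.List.enumerate p.2.toList).foldl (fun acc2 q =>
        if q.2 = '0' then acc2 ++ [(p.1, q.1)] else acc2) acc) []
  pvHolesLoop zeroCoords 0

-- ===== PORT B =====
-- the zero-coordinate comprehension of Source B
def pvZeros (strArr : List String) : List (Int × Int) :=
  (PySem.List.enumerate strArr).flatMap (fun p =>
    ((PySem.List.enumerate p.2.toList).filter (fun q => decide (q.2 = '0'))).map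
      (fun q => (p.1, q.1)))

-- body of the inner for: if nb in zeros: zeros.discard(nb); stack.append(nb)
-- (stack is kept top-first: append = cons, pop() = head)
def pvFloodStep (p : List (Int × Int) × List (Int × Int)) (nb : Int × Int) :
    List (Int × Int) × List (Int × Int) :=
  if PySem.Set.contains p.1 nb then (PySem.Set.discard p.1 nb, nb :: p.2) else p

theorem pvFloodStep_measure : ∀ (cos : List (Int × Int)) (p : List (Int × Int) × List (Int × Int)),
    (cos.foldl pvFloodStep p).1.length + (cos.foldl pvFloodStep p).2.length ≤
      p.1.length + p.2.length := by
  intro cos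
  induction cos with
  | nil => intro p; simp
  | cons co cs ih =>
    intro p
    simp only [List.foldl_cons]
    refine le_trans (ih _) ?_
    by_cases hmem : co ∈ p.1
    · have hlt : (PySem.Set.discard p.1 co).length < p.1.length := by
        simp only [PySem.Set.discard]
        exact List.length_filter_lt_length_iff_exists.2 ⟨co, hmem, by simp⟩
      simp only [pvFloodStep, PySem.Set.contains, List.contains_iff_mem, hmem, decide_true, if_true]
      simp only [List.length_cons]
      omega
    · simp [pvFloodStep, PySem.Set.contains, List.contains_iff_mem, hmem]

-- while stack: r,c = stack.pop(); for nb in …: if nb in zeros: discard; push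
def pvFlood : List (Int × Int) → List (Int × Int) → List (Int × Int)
  | zeros, [] => zeros
  | zeros, s :: rest =>
      pvFlood ((pvNbrs s).foldl pvFloodStep (zeros, rest)).1
        ((pvNbrs s).foldl pvFloodStep (zeros, rest)).2
  termination_by zeros stack => zeros.length + stack.length
  decreasing_by
    have := pvFloodStep_measure (pvNbrs s) (zeros, rest)
    dsimp only at this
    simp only [List.length_cons]
    omega

-- for cell in order: if cell in zeros: count += 1; zeros.discard(cell); flood from cell
def pvBLoop : List (Int × Int) → List (Int × Int) → Int → Int
  | [], _, count => count
  | cell :: rest, zeros, count =>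
      if PySem.Set.contains zeros cell then
        pvBLoop rest (pvFlood (PySem.Set.discard zeros cell) [cell]) (count + 1)
      else pvBLoop rest zeros count

def BitmapHoles_alt (strArr : List String) : Int :=
  let order := pvZeros strArr
  pvBLoop order (PySem.Set.ofList order) 0

-- ===== PRECONDITION & SPEC =====
def Spec_BitmapHoles (strArr : List String) (out : Int) : Prop := out = BitmapHoles_alt strArr
instance (strArr : List String) (out : Int) : Decidable (Spec_BitmapHoles strArr out) := by unfold Spec_BitmapHoles; infer_instance

-- ===== CLAIM (what is proved, stated in full; the proofs are below) =====
def Claim_equal_BitmapHoles : Prop := ∀ (strArr : List String), Dom_BitmapHoles strArr → Spec_BitmapHoles strArr (BitmapHoles strArr)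

-- ===== LEMMAS AND PROOFS =====

-- 4-neighbour reachability inside the coordinate set S, starting at s.
inductive pvReach (S : List (Int × Int)) (s : Int × Int) : Int × Int → Prop
  | refl : pvReach S s s
  | step {a b : Int × Int} : pvReach S s a → b ∈ pvNbrs a → b ∈ S → pvReach S s b

-- What a flood-fill removal pass from `seeds` over worklist `arr` guarantees about its result.
def pvGood (seeds arr res : List (Int × Int)) : Prop :=
  res.Sublist arr ∧
  (∀ x ∈ res, ∀ sd ∈ seeds, x ∉ pvNbrs sd) ∧
  (∀ x ∈ res, ∀ y ∈ arr, y ∉ res → x ∉ pvNbrs y) ∧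
  (∀ (S : List (Int × Int)) (s0 : Int × Int), (∀ z ∈ arr, z ∈ S) →
    (∀ sd ∈ seeds, pvReach S s0 sd) → ∀ y ∈ arr, y ∉ res → pvReach S s0 y)

theorem pv_mem_discard {s : List (Int × Int)} {v x : Int × Int} :
    x ∈ PySem.Set.discard s v ↔ x ∈ s ∧ x ≠ v := by
  simp [PySem.Set.discard]

-- the single try/remove/recurse step of pop_connected, named for the proofs
def pvTryOne (f : Nat) (a : List (Int × Int)) (co : Int × Int) : List (Int × Int) :=
  match PySem.List.remove? a co with
  | none => a
  | some a' => pvPop f co.1 co.2 a'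

theorem pvFoldA_good (f : Nat)
    (IH : ∀ (r c : Int) (arr : List (Int × Int)), arr.Nodup → arr.length ≤ f →
      pvGood [(r, c)] arr (pvPop f r c arr)) :
    ∀ (cos : List (Int × Int)) (arr : List (Int × Int)), arr.Nodup → arr.length ≤ f + 1 →
      ((cos.foldl (pvTryOne f) arr).Sublist arr) ∧
      (∀ co ∈ cos, co ∉ cos.foldl (pvTryOne f) arr) ∧
      (∀ x ∈ cos.foldl (pvTryOne f) arr, ∀ y ∈ arr, y ∉ cos.foldl (pvTryOne f) arr → x ∉ pvNbrs y) ∧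
      (∀ (S : List (Int × Int)) (s0 : Int × Int), (∀ z ∈ arr, z ∈ S) →
        (∀ co ∈ cos, co ∈ S → pvReach S s0 co) →
        ∀ y ∈ arr, y ∉ cos.foldl (pvTryOne f) arr → pvReach S s0 y) := by
  intro cos
  induction cos with
  | nil =>
    intro arr hn hl
    refine ⟨List.Sublist.refl _, by simp, ?_, ?_⟩
    · intro x hx y hy hyn; exact absurd hy hyn
    · intro S s0 _ _ y hy hyn; exact absurd hy hyn
  | cons co cs ihc =>
    intro arr hn hl
    simp only [List.foldl_cons]
    cases hrem : PySem.List.remove? arr co with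
    | none =>
      have hco : co ∉ arr := (PySem.List.remove?_eq_none_iff arr co).1 hrem
      have hstep : pvTryOne f arr co = arr := by simp [pvTryOne, hrem]
      rw [hstep]
      obtain ⟨i1, i2, i3, i4⟩ := ihc arr hn hl
      refine ⟨i1, ?_, i3, fun S s0 hS hcos => i4 S s0 hS
        (fun c hc hcS => hcos c (List.mem_cons_of_mem _ hc) hcS)⟩
      intro nb hnb
      rcases List.mem_cons.1 hnb with rfl | h'
      · exact fun hx => hco (i1.subset hx)
      · exact i2 nb h'
    | some a' =>
      have hco : co ∈ arr := by
        by_contra hcn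
        rw [(PySem.List.remove?_eq_none_iff arr co).2 hcn] at hrem
        simp at hrem
      have ha' : a' = arr.erase co := by
        rw [PySem.List.remove?_eq_some_erase arr co hco] at hrem
        exact (Option.some_inj.1 hrem).symm
      subst ha'
      have hstep : pvTryOne f arr co = pvPop f co.1 co.2 (arr.erase co) := by
        simp [pvTryOne, hrem]
      rw [hstep]
      have hne : (arr.erase co).Nodup := hn.erase co
      have hlen : (arr.erase co).length ≤ f := by
        rw [List.length_erase_of_mem hco]; omega
      have hG := IH co.1 co.2 (arr.erase co) hne hlen
      rw [Prod.mk.eta] at hG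
      obtain ⟨g1, g2, g3, g4⟩ := hG
      have ha1n : (pvPop f co.1 co.2 (arr.erase co)).Nodup := g1.nodup hne
      have ha1l : (pvPop f co.1 co.2 (arr.erase co)).length ≤ f + 1 :=
        le_trans (le_trans g1.length_le List.erase_sublist.length_le) hl
      obtain ⟨i1, i2, i3, i4⟩ := ihc _ ha1n ha1l
      have hsub : (cs.foldl (pvTryOne f) (pvPop f co.1 co.2 (arr.erase co))).Sublist arr :=
        i1.trans (g1.trans List.erase_sublist)
      have hcoNot : co ∉ cs.foldl (pvTryOne f) (pvPop f co.1 co.2 (arr.erase co)) := by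
        intro hx
        have hmem : co ∈ arr.erase co := g1.subset (i1.subset hx)
        exact ((hn.mem_erase_iff).1 hmem).1 rfl
      refine ⟨hsub, ?_, ?_, ?_⟩
      · intro nb hnb
        rcases List.mem_cons.1 hnb with rfl | h'
        · exact hcoNot
        · exact i2 nb h'
      · intro x hx y hy hyn
        by_cases hya : y ∈ pvPop f co.1 co.2 (arr.erase co)
        · exact i3 x hx y hya hyn
        · by_cases hyco : y = co
          · subst hyco
            exact g2 x (i1.subset hx) y (by simp)
          · have hyer : y ∈ arr.erase co := (hn.mem_erase_iff).2 ⟨hyco, hy⟩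
            exact g3 x (i1.subset hx) y hyer hya
      · intro S s0 hS hcos y hy hyn
        have hreachco : pvReach S s0 co := hcos co (by simp) (hS co hco)
        by_cases hya : y ∈ pvPop f co.1 co.2 (arr.erase co)
        · exact i4 S s0 (fun z hz => hS z ((g1.trans List.erase_sublist).subset hz))
            (fun c hc hcS => hcos c (List.mem_cons_of_mem _ hc) hcS) y hya hyn
        · by_cases hyco : y = co
          · subst hyco; exact hreachco
          · have hyer : y ∈ arr.erase co := (hn.mem_erase_iff).2 ⟨hyco, hy⟩
            exact g4 S s0 (fun z hz => hS z (List.erase_sublist.subset hz))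
              (fun sd hsd => by rcases List.mem_singleton.1 hsd with rfl; exact hreachco) y hyer hya

theorem pvPop_good : ∀ (f : Nat) (r c : Int) (arr : List (Int × Int)),
    arr.Nodup → arr.length ≤ f → pvGood [(r, c)] arr (pvPop f r c arr) := by
  intro f
  induction f with
  | zero =>
    intro r c arr hn hl
    have harr : arr = [] := List.length_eq_zero_iff.1 (Nat.le_zero.1 hl)
    subst harr
    refine ⟨List.Sublist.refl _, ?_, ?_, ?_⟩
    · intro x hx; simp [pvPop] at hx
    · intro x hx; simp [pvPop] at hx
    · intro S s0 _ _ y hy; simp at hy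
  | succ f ihf =>
    intro r c arr hn hl
    have heq : pvPop (f + 1) r c arr = (pvNbrs (r, c)).foldl (pvTryOne f) arr := rfl
    rw [heq]
    obtain ⟨a1, a2, a3, a4⟩ := pvFoldA_good f (fun r c arr hn hl => ihf r c arr hn hl)
      (pvNbrs (r, c)) arr hn hl
    refine ⟨a1, ?_, a3, ?_⟩
    · intro x hx sd hsd
      rcases List.mem_singleton.1 hsd with rfl
      exact fun hxn => a2 x hxn hx
    · intro S s0 hS hseeds y hy hyn
      have hr : pvReach S s0 (r, c) := hseeds (r, c) (by simp)
      exact a4 S s0 hS (fun co hco hcoS => pvReach.step hr hco hcoS) y hy hyn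

theorem pvFoldB_facts : ∀ (cos : List (Int × Int)) (p : List (Int × Int) × List (Int × Int)),
    ((cos.foldl pvFloodStep p).1.Sublist p.1) ∧
    (∀ nb ∈ cos, nb ∉ (cos.foldl pvFloodStep p).1) ∧
    (∀ x ∈ (cos.foldl pvFloodStep p).2, x ∈ p.2 ∨ (x ∈ cos ∧ x ∈ p.1)) ∧
    (∀ x ∈ p.2, x ∈ (cos.foldl pvFloodStep p).2) ∧
    (∀ y ∈ p.1, y ∉ (cos.foldl pvFloodStep p).1 → y ∈ (cos.foldl pvFloodStep p).2) := by
  intro cos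
  induction cos with
  | nil =>
    intro p
    refine ⟨List.Sublist.refl _, by simp, fun x hx => Or.inl hx, fun x hx => hx, ?_⟩
    intro y hy hyn; exact absurd hy hyn
  | cons co cs ih =>
    intro p
    simp only [List.foldl_cons]
    by_cases hmem : co ∈ p.1
    · have hstep : pvFloodStep p co = (PySem.Set.discard p.1 co, co :: p.2) := by
        simp [pvFloodStep, PySem.Set.contains, hmem]
      rw [hstep]
      obtain ⟨i1, i2, i3, i4, i5⟩ := ih (PySem.Set.discard p.1 co, co :: p.2)
      dsimp only at i1 i2 i3 i4 i5
      have hdsub : (PySem.Set.discard p.1 co).Sublist p.1 := List.filter_sublist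
      refine ⟨i1.trans hdsub, ?_, ?_, ?_, ?_⟩
      · intro nb hnb
        rcases List.mem_cons.1 hnb with rfl | h'
        · intro hx
          exact (pv_mem_discard.1 (i1.subset hx)).2 rfl
        · exact i2 nb h'
      · intro x hx
        rcases i3 x hx with hx2 | ⟨hxc, hxd⟩
        · rcases List.mem_cons.1 hx2 with rfl | h'
          · exact Or.inr ⟨List.mem_cons_self, hmem⟩
          · exact Or.inl h'
        · exact Or.inr ⟨List.mem_cons_of_mem _ hxc, (pv_mem_discard.1 hxd).1⟩
      · intro x hx
        exact i4 x (List.mem_cons_of_mem _ hx)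
      · intro y hy hyn
        by_cases hyd : y ∈ PySem.Set.discard p.1 co
        · exact i5 y hyd hyn
        · have : y = co := by
            by_contra hne
            exact hyd (pv_mem_discard.2 ⟨hy, hne⟩)
          subst this
          exact i4 y List.mem_cons_self
    · have hstep : pvFloodStep p co = p := by
        simp [pvFloodStep, PySem.Set.contains, hmem]
      rw [hstep]
      obtain ⟨i1, i2, i3, i4, i5⟩ := ih p
      refine ⟨i1, ?_, ?_, i4, i5⟩
      · intro nb hnb
        rcases List.mem_cons.1 hnb with rfl | h'
        · exact fun hx => hmem (i1.subset hx)
        · exact i2 nb h'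
      · intro x hx
        rcases i3 x hx with h' | ⟨hxc, hxp⟩
        · exact Or.inl h'
        · exact Or.inr ⟨List.mem_cons_of_mem _ hxc, hxp⟩

theorem pvFlood_good : ∀ (n : Nat) (zeros stack : List (Int × Int)),
    zeros.length + stack.length ≤ n → zeros.Nodup →
    pvGood stack zeros (pvFlood zeros stack) := by
  intro n
  induction n with
  | zero =>
    intro zeros stack h hn
    have hz : zeros = [] := List.length_eq_zero_iff.1 (by omega)
    have hs : stack = [] := List.length_eq_zero_iff.1 (by omega)
    subst hz; subst hs
    refine ⟨by rw [pvFlood], ?_, ?_, ?_⟩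
    · intro x hx; rw [pvFlood] at hx; simp at hx
    · intro x hx; rw [pvFlood] at hx; simp at hx
    · intro S s0 _ _ y hy; simp at hy
  | succ n ih =>
    intro zeros stack h hn
    cases stack with
    | nil =>
      rw [pvFlood]
      refine ⟨List.Sublist.refl _, by simp, ?_, ?_⟩
      · intro x hx y hy hyn; exact absurd hy hyn
      · intro S s0 _ _ y hy hyn; exact absurd hy hyn
    | cons s rest =>
      rw [pvFlood]
      obtain ⟨f1, f2, f3, f4, f5⟩ := pvFoldB_facts (pvNbrs s) (zeros, rest)
      dsimp only at f1 f2 f3 f4 f5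
      have hq1n : ((pvNbrs s).foldl pvFloodStep (zeros, rest)).1.Nodup := f1.nodup hn
      have hmeas := pvFloodStep_measure (pvNbrs s) (zeros, rest)
      dsimp only at hmeas
      simp only [List.length_cons] at h
      obtain ⟨r1, r2, r3, r4⟩ := ih ((pvNbrs s).foldl pvFloodStep (zeros, rest)).1
        ((pvNbrs s).foldl pvFloodStep (zeros, rest)).2 (by omega) hq1n
      refine ⟨r1.trans f1, ?_, ?_, ?_⟩
      · intro x hx sd hsd
        rcases List.mem_cons.1 hsd with rfl | hsd'
        · exact fun hxn => f2 x hxn (r1.subset hx)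
        · exact r2 x hx sd (f4 sd hsd')
      · intro x hx y hy hyn
        by_cases hyq : y ∈ ((pvNbrs s).foldl pvFloodStep (zeros, rest)).1
        · exact r3 x hx y hyq hyn
        · exact r2 x hx y (f5 y hy hyq)
      · intro S s0 hS hseeds y hy hyn
        have hseeds' : ∀ t ∈ ((pvNbrs s).foldl pvFloodStep (zeros, rest)).2, pvReach S s0 t := by
          intro t ht
          rcases f3 t ht with htr | ⟨htn, htz⟩
          · exact hseeds t (List.mem_cons_of_mem _ htr)
          · exact pvReach.step (hseeds s List.mem_cons_self) htn (hS t htz)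
        by_cases hyq : y ∈ ((pvNbrs s).foldl pvFloodStep (zeros, rest)).1
        · exact r4 S s0 (fun z hz => hS z (f1.subset hz)) hseeds' y hyq hyn
        · exact hseeds' y (f5 y hy hyq)

theorem pvReach_cases {S : List (Int × Int)} {s z : Int × Int} (h : pvReach S s z) :
    z = s ∨ z ∈ S := by
  induction h with
  | refl => exact Or.inl rfl
  | step _ _ hS _ => exact Or.inr hS

theorem pvGood_mem_iff {s : Int × Int} {arr res : List (Int × Int)}
    (h : pvGood [s] arr res) (hn : arr.Nodup) (hs : s ∉ arr) :
    ∀ x, x ∈ res ↔ (x ∈ arr ∧ ¬ pvReach (s :: arr) s x) := by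
  obtain ⟨h1, h2, h3, h4⟩ := h
  have aux : ∀ z, pvReach (s :: arr) s z → z = s ∨ z ∉ res := by
    intro z hz
    induction hz with
    | refl => exact Or.inl rfl
    | @step a b ha hb hbS ih =>
      by_cases hbres : b ∈ res
      · exfalso
        rcases ih with rfl | hares
        · exact h2 b hbres a (by simp) hb
        · rcases pvReach_cases ha with rfl | haS
          · exact h2 b hbres a (by simp) hb
          · rcases List.mem_cons.1 haS with rfl | harr
            · exact h2 b hbres a (by simp) hb
            · exact h3 b hbres a harr hares hb
      · exact Or.inr hbres
  intro x
  constructor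
  · intro hx
    refine ⟨h1.subset hx, fun hr => ?_⟩
    rcases aux x hr with rfl | hnx
    · exact hs (h1.subset hx)
    · exact hnx hx
  · rintro ⟨hxarr, hnr⟩
    by_contra hxres
    refine hnr (h4 (s :: arr) s (fun z hz => List.mem_cons_of_mem _ hz) ?_ x hxarr hxres)
    intro sd hsd
    rcases List.mem_singleton.1 hsd with rfl
    exact pvReach.refl

theorem pv_filter_sublist {l r : List (Int × Int)} (hn : l.Nodup) (h : r.Sublist l) :
    l.filter (fun x => decide (x ∈ r)) = r := by
  induction h with
  | slnil => simp
  | @cons l₁ l₂ a h ih =>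
    have ha : a ∉ l₂ := (List.nodup_cons.1 hn).1
    have ha1 : a ∉ l₁ := fun hx => ha (h.subset hx)
    simp only [List.filter_cons, ha1, decide_false, if_neg]
    exact ih (List.nodup_cons.1 hn).2
  | @cons₂ l₁ l₂ a h ih =>
    have ha : a ∉ l₂ := (List.nodup_cons.1 hn).1
    have hpa : (fun x => decide (x ∈ a :: l₁)) a = true := by simp
    have hcg : ∀ x ∈ l₂, (fun x => decide (x ∈ a :: l₁)) x = (fun x => decide (x ∈ l₁)) x := by
      intro x hx
      have hxa : x ≠ a := fun hxe => ha (hxe ▸ hx)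
      simp [List.mem_cons, hxa]
    rw [List.filter_cons, if_pos hpa, List.filter_congr hcg, ih (List.nodup_cons.1 hn).2]

theorem pv_sublist_eq_of_mem_iff {l r1 r2 : List (Int × Int)} (hn : l.Nodup)
    (h1 : r1.Sublist l) (h2 : r2.Sublist l) (h : ∀ x, x ∈ r1 ↔ x ∈ r2) : r1 = r2 := by
  rw [← pv_filter_sublist hn h1, ← pv_filter_sublist hn h2]
  exact List.filter_congr (fun x _ => by simp [h x])

theorem pv_iteration_eq (t : List (Int × Int)) (s : Int × Int)
    (hn : t.Nodup) (hs : s ∉ t) :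
    pvPop t.length s.1 s.2 t = pvFlood t [s] := by
  have g1 := pvPop_good t.length s.1 s.2 t hn le_rfl
  rw [Prod.mk.eta] at g1
  have g2 := pvFlood_good (t.length + 1) t [s] (by simp) hn
  exact pv_sublist_eq_of_mem_iff hn g1.1 g2.1
    (fun x => (pvGood_mem_iff g1 hn hs x).trans (pvGood_mem_iff g2 hn hs x).symm)

theorem pv_loops_eq : ∀ (suf : List (Int × Int)), suf.Nodup →
    ∀ (zl : List (Int × Int)), zl.Sublist suf → ∀ (count : Int),
    pvHolesLoop zl count = pvBLoop suf zl count := by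
  intro suf
  induction suf with
  | nil =>
    intro _ zl hsub count
    rw [List.sublist_nil.1 hsub]
    rw [pvHolesLoop, pvBLoop]
  | cons cell rest ih =>
    intro hnd zl hsub count
    obtain ⟨hc1, hc2⟩ := List.nodup_cons.1 hnd
    by_cases hm : cell ∈ zl
    · rcases List.sublist_cons_iff.1 hsub with h' | ⟨rr, rfl, hr⟩
      · exact absurd (h'.subset hm) hc1
      · have hzn : (cell :: rr).Nodup := hsub.nodup hnd
        have hcr : cell ∉ rr := (List.nodup_cons.1 hzn).1
        have hrn : rr.Nodup := (List.nodup_cons.1 hzn).2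
        have hcont : PySem.Set.contains (cell :: rr) cell = true := by
          simp [PySem.Set.contains]
        have hd : PySem.Set.discard (cell :: rr) cell = rr := by
          simp only [PySem.Set.discard, List.filter_cons, beq_self_eq_true,
            Bool.not_true, if_neg, Bool.false_eq_true, not_false_iff]
          exact List.filter_eq_self.2 (fun x hx => by
            have hxc : x ≠ cell := fun hxe => hcr (hxe ▸ hx)
            simp [hxc])
        rw [pvBLoop, hcont, if_pos rfl, hd]
        rw [pvHolesLoop]
        rw [pv_iteration_eq rr cell hrn hcr]
        have hfsub : (pvFlood rr [cell]).Sublist rest :=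
          (pvFlood_good (rr.length + 1) rr [cell] (by simp) hrn).1.trans hr
        exact ih hc2 (pvFlood rr [cell]) hfsub (count + 1)
    · have hcont : PySem.Set.contains zl cell = false := by
        simp [PySem.Set.contains, hm]
      have hzr : zl.Sublist rest := by
        rcases List.sublist_cons_iff.1 hsub with h' | ⟨rr, rfl, hr⟩
        · exact h'
        · exact absurd List.mem_cons_self hm
      rw [pvBLoop, hcont]
      simp only [Bool.false_eq_true, if_neg, not_false_iff]
      exact ih hc2 zl hzr count

theorem pvZeros_nodup (strArr : List String) : (pvZeros strArr).Nodup := by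
  unfold pvZeros
  rw [List.nodup_flatMap]
  constructor
  · intro p _
    have hpw : ((PySem.List.enumerate p.2.toList 0).filter
        (fun q => decide (q.2 = '0'))).Pairwise (fun a b => a.1 < b.1) :=
      (PySem.List.pairwise_lt_enumerate _ _).sublist List.filter_sublist
    have : (((PySem.List.enumerate p.2.toList 0).filter
        (fun q => decide (q.2 = '0'))).map (fun q => (p.1, q.1))).Pairwise (· ≠ ·) := by
      rw [List.pairwise_map]
      refine hpw.imp ?_
      intro a b hab
      simp only [ne_eq, Prod.mk.injEq, not_and]
      intro _ h2
      exact absurd h2 (ne_of_lt hab)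
    exact this
  · refine (PySem.List.pairwise_lt_enumerate strArr 0).imp ?_
    intro p q hpq
    intro x hx1 hx2
    simp only [List.mem_map, List.mem_filter] at hx1 hx2
    obtain ⟨a, _, rfl⟩ := hx1
    obtain ⟨b, _, hb⟩ := hx2
    have : p.1 = q.1 := (congrArg Prod.fst hb).symm
    omega

theorem pvZeroCoords_eq (strArr : List String) :
    (PySem.List.enumerate strArr).foldl (fun acc p =>
      (PySem.List.enumerate p.2.toList).foldl (fun acc2 q =>
        if q.2 = '0' then acc2 ++ [(p.1, q.1)] else acc2) acc) [] = pvZeros strArr := by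
  have hinner : ∀ (i : Int) (cs : List Char) (acc : List (Int × Int)),
      (PySem.List.enumerate cs 0).foldl
        (fun acc2 q => if q.2 = '0' then acc2 ++ [(i, q.1)] else acc2) acc
      = acc ++ ((PySem.List.enumerate cs 0).filter
          (fun q => decide (q.2 = '0'))).map (fun q => (i, q.1)) :=
    fun i cs acc => PySem.List.foldl_append_ite _ _ _ _
  simp only [hinner]
  simp only [PySem.List.foldl_append_eq_flatMap, List.nil_append]
  rfl

-- ===== VERDICT (by name: the statement is the Claim_ definition above) =====
theorem BitmapHoles_spec : Claim_equal_BitmapHoles := by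
  intro strArr _
  unfold Spec_BitmapHoles BitmapHoles BitmapHoles_alt
  simp only [pvZeroCoords_eq]
  rw [PySem.Set.ofList_eq_self_of_nodup _ (pvZeros_nodup strArr)]
  exact pv_loops_eq (pvZeros strArr) (pvZeros_nodup strArr) (pvZeros strArr) (List.Sublist.refl _) 0
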